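-- pv_equiv track=rewrite | github.com/shmulisarmy/equation-solver | main.py | flood_fill_outside_with_barriers
-- ===== SOURCE A (Python) =====
-- from collections import deque
--
-- def flood_fill_outside_with_barriers(grid, barriers):
--     """
--     Returns a 2D boolean array 'outside' where outside[x][y] is True
--     if that cell is reachable from the border without crossing a barrier.
--     """
--     gw, gh = len(grid), len(grid[0])
--     visited = [[False] * gh for _ in range(gw)]
--     outside = [[False] * gh for _ in range(gw)]
--     queue = deque()
--
--     # Enqueue all border cells that are not barriers.
--     for x in range(gw):
--         for y in [0, gh - 1]:
--             if (x, y) not in barriers and not visited[x][y]: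
--                 queue.append((x, y))
--                 visited[x][y] = True
--                 outside[x][y] = True
--     for y in range(gh):
--         for x in [0, gw - 1]:
--             if (x, y) not in barriers and not visited[x][y]:
--                 queue.append((x, y))
--                 visited[x][y] = True
--                 outside[x][y] = True
--
--     # Standard BFS flood fill.
--     while queue:
--         cx, cy = queue.popleft()
--         for dx, dy in [(1, 0), (-1, 0), (0, 1), (0, -1)]:
--             nx, ny = cx + dx, cy + dy
--             if 0 <= nx < gw and 0 <= ny < gh:
--                 if (nx, ny) in barriers:
--                     continue
--                 if not visited[nx][ny]:
--                     visited[nx][ny] = True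
--                     outside[nx][ny] = True
--                     queue.append((nx, ny))
--     return outside
-- ===== SOURCE B (Python) =====
-- def flood_fill_outside_with_barriers(grid, barriers):
--     """Round-based fixpoint saturation instead of a BFS queue: repeatedly
--     dilate the border-seeded set by one neighbour layer until nothing new
--     appears, then materialise the boolean matrix."""
--     gw, gh = len(grid), len(grid[0])
--
--     def ok(x, y):
--         return 0 <= x < gw and 0 <= y < gh and (x, y) not in barriers
--
--     reach = set()
--     for x in range(gw):
--         for y in (0, gh - 1):
--             if ok(x, y):
--                 reach.add((x, y))
--     for y in range(gh):
--         for x in (0, gw - 1):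
--             if ok(x, y):
--                 reach.add((x, y))
--
--     while True:
--         new = set()
--         for (x, y) in reach:
--             for (nx, ny) in ((x + 1, y), (x - 1, y), (x, y + 1), (x, y - 1)):
--                 if ok(nx, ny) and (nx, ny) not in reach:
--                     new.add((nx, ny))
--         if not new:
--             break
--         reach |= new
--
--     return [[(x, y) in reach for y in range(gh)] for x in range(gw)]
-- ===== Notes on version B (the rewrite author's own statement) =====
-- stated objective: alternative
-- what changed: Replaces the deque-based breadth-first flood fill with round-based fixpoint saturation: a set seeded with the non-barrier border cells is repeatedly dilated by one whole neighbour layer until no new cell appears, and the boolean matrix is materialised once at the end instead of being updated cell by cell.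
import Mathlib
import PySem

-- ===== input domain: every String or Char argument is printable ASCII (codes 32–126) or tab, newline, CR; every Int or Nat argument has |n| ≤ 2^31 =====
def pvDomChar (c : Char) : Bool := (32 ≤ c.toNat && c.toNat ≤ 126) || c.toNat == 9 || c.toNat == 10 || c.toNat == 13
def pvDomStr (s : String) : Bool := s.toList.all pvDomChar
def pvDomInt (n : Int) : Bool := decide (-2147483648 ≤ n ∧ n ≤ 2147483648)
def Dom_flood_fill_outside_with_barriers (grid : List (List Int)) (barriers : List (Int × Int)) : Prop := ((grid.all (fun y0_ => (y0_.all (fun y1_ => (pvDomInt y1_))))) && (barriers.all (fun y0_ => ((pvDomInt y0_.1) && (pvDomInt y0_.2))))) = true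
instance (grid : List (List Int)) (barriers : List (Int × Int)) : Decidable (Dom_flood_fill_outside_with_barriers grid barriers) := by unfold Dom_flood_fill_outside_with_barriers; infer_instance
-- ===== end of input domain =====

-- B replaces A's deque-based BFS flood fill by round-based fixpoint saturation of a set
-- (dilate the border-seeded set one neighbour layer per round until stable); objective:
-- alternative algorithm, not claimed faster.  Both ports represent the Python boolean
-- matrices / visited structures by the set of their True cells and materialise the
-- returned matrix at the end; return values are what is proved equal.

-- ===== PORT A =====
-- helpers for the termination measure of A's BFS loop (cited by `decreasing_by`)
abbrev pvInBP (gw gh : Int) (p : Int × Int) : Prop :=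
  0 ≤ p.1 ∧ p.1 < gw ∧ 0 ≤ p.2 ∧ p.2 < gh

def pvDlen (gw gh : Int) (v : List (Int × Int)) : Nat :=
  ((v.filter (fun p => decide (pvInBP gw gh p))).toFinset).card

lemma pvDlen_le (gw gh : Int) (v : List (Int × Int)) :
    pvDlen gw gh v ≤ gw.toNat * gh.toNat := by
  have hsub : (v.filter (fun p => decide (pvInBP gw gh p))).toFinset ⊆
      Finset.Icc (0:ℤ) (gw - 1) ×ˢ Finset.Icc (0:ℤ) (gh - 1) := by
    intro p hp
    simp only [List.mem_toFinset, List.mem_filter, decide_eq_true_eq] at hp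
    obtain ⟨-, h1, h2, h3, h4⟩ := hp
    simp only [Finset.mem_product, Finset.mem_Icc]
    omega
  have hcard := Finset.card_le_card hsub
  rw [Finset.card_product, Int.card_Icc, Int.card_Icc] at hcard
  unfold pvDlen
  calc ((v.filter (fun p => decide (pvInBP gw gh p))).toFinset).card
      ≤ (gw - 1 + 1 - 0).toNat * (gh - 1 + 1 - 0).toNat := hcard
    _ = gw.toNat * gh.toNat := by norm_num

lemma pvDlen_append (gw gh : Int) (v ext : List (Int × Int)) (hnd : ext.Nodup)
    (hm : ∀ p ∈ ext, pvInBP gw gh p ∧ p ∉ v) :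
    pvDlen gw gh (v ++ ext) = pvDlen gw gh v + ext.length := by
  unfold pvDlen
  have hfe : ext.filter (fun p => decide (pvInBP gw gh p)) = ext :=
    List.filter_eq_self.mpr (fun p hp => by simpa using (hm p hp).1)
  have hdisj : Disjoint ((v.filter (fun p => decide (pvInBP gw gh p))).toFinset) ext.toFinset := by
    rw [Finset.disjoint_right]
    intro p hp hpv
    simp only [List.mem_toFinset] at hp
    simp only [List.mem_toFinset, List.mem_filter] at hpv
    exact (hm p hp).2 hpv.1
  rw [List.filter_append, List.toFinset_append, hfe,
    Finset.card_union_of_disjoint hdisj, List.toFinset_card_of_nodup hnd]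

lemma pvDlen_congr (gw gh : Int) (v w : List (Int × Int)) (h : ∀ p, p ∈ v ↔ p ∈ w) :
    pvDlen gw gh v = pvDlen gw gh w := by
  unfold pvDlen
  congr 1
  ext p
  simp [h p]

-- a nested fold over `xs` with inner lists `g x` is a fold over the flattened list
lemma pvFoldl_foldl_flatMap {α β σ : Type} (f : σ → β → σ) (g : α → List β) :
    ∀ (xs : List α) (s : σ),
    xs.foldl (fun s x => (g x).foldl f s) s = (xs.flatMap g).foldl f s := by
  intro xs
  induction xs with
  | nil => intro s; rfl
  | cons x xs ih => intro s; simp [List.foldl_append, ih]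

-- one step of A's inner `for dx, dy in [...]` loop; state = (visited, outside, queue-appends)
def pvStepA (gw gh : Int) (barriers : List (Int × Int)) (c : Int × Int)
    (s : List (Int × Int) × List (Int × Int) × List (Int × Int)) (d : Int × Int) :
    List (Int × Int) × List (Int × Int) × List (Int × Int) :=
  let n := (c.1 + d.1, c.2 + d.2)
  if 0 ≤ n.1 ∧ n.1 < gw ∧ 0 ≤ n.2 ∧ n.2 < gh then
    if n ∈ barriers then s
    else if n ∈ s.1 then s
    else (s.1 ++ [n], s.2.1 ++ [n], s.2.2 ++ [n])
  else s

-- what one pass of the neighbour loop does (cited by `decreasing_by` and by the proofs)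
lemma pvStepA_fold_spec (gw gh : Int) (barriers : List (Int × Int)) (c : Int × Int) :
    ∀ (ds : List (Int × Int)) (v o q : List (Int × Int)),
    ∃ ext : List (Int × Int),
      ds.foldl (pvStepA gw gh barriers c) (v, o, q) = (v ++ ext, o ++ ext, q ++ ext) ∧
      ext.Nodup ∧
      (∀ p ∈ ext, p ∈ ds.map (fun d => (c.1 + d.1, c.2 + d.2)) ∧
        pvInBP gw gh p ∧ p ∉ barriers ∧ p ∉ v) ∧
      (∀ d ∈ ds, pvInBP gw gh (c.1 + d.1, c.2 + d.2) → (c.1 + d.1, c.2 + d.2) ∉ barriers →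
        (c.1 + d.1, c.2 + d.2) ∈ v ++ ext) := by
  intro ds
  induction ds with
  | nil =>
    intro v o q
    exact ⟨[], by simp, by simp, by simp, by simp⟩
  | cons d ds ih =>
    intro v o q
    rw [List.foldl_cons]
    by_cases hb : 0 ≤ c.1 + d.1 ∧ c.1 + d.1 < gw ∧ 0 ≤ c.2 + d.2 ∧ c.2 + d.2 < gh
    · by_cases hbar : (c.1 + d.1, c.2 + d.2) ∈ barriers
      · have hstep : pvStepA gw gh barriers c (v, o, q) d = (v, o, q) := by
          simp [pvStepA, hb, hbar]
        rw [hstep]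
        obtain ⟨ext, heq, hnd, hmem, hcl⟩ := ih v o q
        refine ⟨ext, heq, hnd, fun p hp => ?_, fun d' hd' => ?_⟩
        · obtain ⟨h1, h2⟩ := hmem p hp
          exact ⟨by simp only [List.map_cons, List.mem_cons]; exact Or.inr h1, h2⟩
        · rcases List.mem_cons.mp hd' with rfl | hd'
          · intro _ hnb; exact absurd hbar hnb
          · exact hcl d' hd'
      · by_cases hv : (c.1 + d.1, c.2 + d.2) ∈ v
        · have hstep : pvStepA gw gh barriers c (v, o, q) d = (v, o, q) := by
            simp [pvStepA, hb, hbar, hv]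
          rw [hstep]
          obtain ⟨ext, heq, hnd, hmem, hcl⟩ := ih v o q
          refine ⟨ext, heq, hnd, fun p hp => ?_, fun d' hd' => ?_⟩
          · obtain ⟨h1, h2⟩ := hmem p hp
            exact ⟨by simp only [List.map_cons, List.mem_cons]; exact Or.inr h1, h2⟩
          · rcases List.mem_cons.mp hd' with rfl | hd'
            · intro _ _; exact List.mem_append_left _ hv
            · exact hcl d' hd'
        · have hstep : pvStepA gw gh barriers c (v, o, q) d =
              (v ++ [(c.1 + d.1, c.2 + d.2)], o ++ [(c.1 + d.1, c.2 + d.2)],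
               q ++ [(c.1 + d.1, c.2 + d.2)]) := by
            simp [pvStepA, hb, hbar, hv]
          rw [hstep]
          obtain ⟨ext, heq, hnd, hmem, hcl⟩ :=
            ih (v ++ [(c.1 + d.1, c.2 + d.2)]) (o ++ [(c.1 + d.1, c.2 + d.2)])
              (q ++ [(c.1 + d.1, c.2 + d.2)])
          refine ⟨(c.1 + d.1, c.2 + d.2) :: ext, ?_, ?_, fun p hp => ?_, fun d' hd' => ?_⟩
          · rw [heq]; simp
          · refine List.nodup_cons.mpr ⟨fun hmem' => ?_, hnd⟩
            exact (hmem _ hmem').2.2.2 (List.mem_append_right _ (List.mem_singleton.mpr rfl))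
          · rcases List.mem_cons.mp hp with rfl | hp
            · exact ⟨by simp, hb, hbar, hv⟩
            · obtain ⟨h1, h2, h3, h4⟩ := hmem p hp
              refine ⟨by simp only [List.map_cons, List.mem_cons]; exact Or.inr h1, h2, h3,
                fun hpv => h4 (List.mem_append_left _ hpv)⟩
          · rcases List.mem_cons.mp hd' with rfl | hd'
            · intro _ _
              exact List.mem_append_right _ (List.mem_cons_self ..)
            · intro h1 h2
              have := hcl d' hd' h1 h2
              simpa using this
    · have hstep : pvStepA gw gh barriers c (v, o, q) d = (v, o, q) := by
        simp only [pvStepA]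
        rw [if_neg hb]
      rw [hstep]
      obtain ⟨ext, heq, hnd, hmem, hcl⟩ := ih v o q
      refine ⟨ext, heq, hnd, fun p hp => ?_, fun d' hd' => ?_⟩
      · obtain ⟨h1, h2⟩ := hmem p hp
        exact ⟨by simp only [List.map_cons, List.mem_cons]; exact Or.inr h1, h2⟩
      · rcases List.mem_cons.mp hd' with rfl | hd'
        · intro hin _; exact absurd hin hb
        · exact hcl d' hd'

-- A's `while queue:` BFS loop
def pvBfsA (gw gh : Int) (barriers : List (Int × Int))
    (v o q : List (Int × Int)) : List (Int × Int) × List (Int × Int) :=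
  match q with
  | [] => (v, o)
  | c :: rest =>
    let t := [((1:Int), (0:Int)), (-1, 0), (0, 1), (0, -1)].foldl
        (pvStepA gw gh barriers c) (v, o, [])
    pvBfsA gw gh barriers t.1 t.2.1 (rest ++ t.2.2)
termination_by (gw.toNat * gh.toNat - pvDlen gw gh v, q.length)
decreasing_by
  obtain ⟨ext, heq, hnd, hmem, -⟩ :=
    pvStepA_fold_spec gw gh barriers c [((1:Int), (0:Int)), (-1, 0), (0, 1), (0, -1)] v o []
  simp only [heq, List.nil_append]
  by_cases hext : ext = []
  · subst hext
    simp only [List.append_nil]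
    exact Prod.Lex.right _ (by simp)
  · have hlt : pvDlen gw gh v < pvDlen gw gh (v ++ ext) := by
      rw [pvDlen_append gw gh v ext hnd (by intro p hp; exact ⟨(hmem p hp).2.1, (hmem p hp).2.2.2⟩)]
      have : ext.length ≠ 0 := by simpa [List.length_eq_zero_iff] using hext
      omega
    have hle := pvDlen_le gw gh (v ++ ext)
    exact Prod.Lex.left _ _ (by omega)

-- A's border-seeding step: `if (x, y) not in barriers and not visited[x][y]: append+mark`
def pvSeedA (barriers : List (Int × Int))
    (s : List (Int × Int) × List (Int × Int) × List (Int × Int)) (c : Int × Int) :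
    List (Int × Int) × List (Int × Int) × List (Int × Int) :=
  if c ∉ barriers ∧ c ∉ s.1 then (s.1 ++ [c], s.2.1 ++ [c], s.2.2 ++ [c]) else s

def flood_fill_outside_with_barriers (grid : List (List Int)) (barriers : List (Int × Int)) : List (List Bool) :=
  let gw : Int := grid.length
  let gh : Int := grid.headI.length
  -- for x in range(gw): for y in [0, gh - 1]: …
  let s1 := (PySem.List.pyRange 0 gw 1).foldl
    (fun s x => [(x, (0:Int)), (x, gh - 1)].foldl (pvSeedA barriers) s) ([], [], [])
  -- for y in range(gh): for x in [0, gw - 1]: …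
  let s2 := (PySem.List.pyRange 0 gh 1).foldl
    (fun s y => [((0:Int), y), (gw - 1, y)].foldl (pvSeedA barriers) s) s1
  let r := pvBfsA gw gh barriers s2.1 s2.2.1 s2.2.2
  -- materialise the `outside` matrix (r.2 is the set of its True cells)
  (PySem.List.pyRange 0 gw 1).map (fun x =>
    (PySem.List.pyRange 0 gh 1).map (fun y => decide ((x, y) ∈ r.2)))

-- ===== PORT B =====
-- B's helper `ok(x, y)`
abbrev pvOkB (gw gh : Int) (barriers : List (Int × Int)) (p : Int × Int) : Prop :=
  0 ≤ p.1 ∧ p.1 < gw ∧ 0 ≤ p.2 ∧ p.2 < gh ∧ p ∉ barriers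

-- `new = set(); for (x, y) in reach: for (nx, ny) in …: if ok and not in reach: new.add(…)`
def pvNewB (gw gh : Int) (barriers : List (Int × Int)) (reach : PySem.Set (Int × Int)) :
    PySem.Set (Int × Int) :=
  reach.foldl (fun acc c =>
    [(c.1 + 1, c.2), (c.1 - 1, c.2), (c.1, c.2 + 1), (c.1, c.2 - 1)].foldl
      (fun acc n => if pvOkB gw gh barriers n ∧ n ∉ reach then PySem.Set.add acc n else acc) acc)
    PySem.Set.empty

-- facts about `new` cited by `decreasing_by` of the saturation loop
lemma pvNewB_eq (gw gh : Int) (barriers : List (Int × Int)) (reach : PySem.Set (Int × Int)) :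
    pvNewB gw gh barriers reach =
      PySem.Set.ofList ((reach.flatMap
          (fun c => [(c.1 + 1, c.2), (c.1 - 1, c.2), (c.1, c.2 + 1), (c.1, c.2 - 1)])).filter
        (fun n => decide (pvOkB gw gh barriers n ∧ n ∉ reach))) := by
  unfold pvNewB
  have hflat := pvFoldl_foldl_flatMap
    (f := fun acc n => if pvOkB gw gh barriers n ∧ n ∉ reach then PySem.Set.add acc n else acc)
    (g := fun c => [(c.1 + 1, c.2), (c.1 - 1, c.2), (c.1, c.2 + 1), (c.1, c.2 - 1)])
    reach PySem.Set.empty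
  beta_reduce at hflat
  rw [hflat]
  rw [PySem.List.foldl_ite_eq_foldl_filter
    (p := fun n => pvOkB gw gh barriers n ∧ n ∉ reach) (f := PySem.Set.add)]
  rw [PySem.Set.ofList_eq_foldl]
  rfl

lemma pvNewB_nodup (gw gh : Int) (barriers : List (Int × Int)) (reach : PySem.Set (Int × Int)) :
    (pvNewB gw gh barriers reach).Nodup := by
  rw [pvNewB_eq]
  exact PySem.Set.nodup_ofList _

lemma pvNewB_mem_term (gw gh : Int) (barriers : List (Int × Int)) (reach : PySem.Set (Int × Int)) :
    ∀ p ∈ pvNewB gw gh barriers reach, pvInBP gw gh p ∧ p ∉ reach := by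
  intro p hp
  rw [pvNewB_eq] at hp
  rw [PySem.Set.mem_ofList, List.mem_filter, decide_eq_true_eq] at hp
  obtain ⟨-, ⟨ha, hb, hc, hd, -⟩, hr⟩ := hp
  exact ⟨⟨ha, hb, hc, hd⟩, hr⟩

-- B's `while True: … if not new: break; reach |= new`
def pvSatB (gw gh : Int) (barriers : List (Int × Int)) (reach : PySem.Set (Int × Int)) :
    PySem.Set (Int × Int) :=
  if pvNewB gw gh barriers reach = [] then reach
  else pvSatB gw gh barriers (PySem.Set.union reach (pvNewB gw gh barriers reach))
termination_by gw.toNat * gh.toNat - pvDlen gw gh reach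
decreasing_by
  have hnd := pvNewB_nodup gw gh barriers reach
  have hm := pvNewB_mem_term gw gh barriers reach
  have hcongr : pvDlen gw gh (PySem.Set.union reach (pvNewB gw gh barriers reach)) =
      pvDlen gw gh (reach ++ pvNewB gw gh barriers reach) := by
    apply pvDlen_congr
    intro p
    rw [PySem.Set.mem_union, List.mem_append]
  have happ := pvDlen_append gw gh reach (pvNewB gw gh barriers reach) hnd
    (fun p hp => ⟨(hm p hp).1, (hm p hp).2⟩)
  have hle := pvDlen_le gw gh (reach ++ pvNewB gw gh barriers reach)
  have hlen : (pvNewB gw gh barriers reach).length ≠ 0 := by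
    simp_all [List.length_eq_zero_iff]
  omega

def flood_fill_outside_with_barriers_alt (grid : List (List Int)) (barriers : List (Int × Int)) : List (List Bool) :=
  let gw : Int := grid.length
  let gh : Int := grid.headI.length
  -- for x in range(gw): for y in (0, gh - 1): if ok(x, y): reach.add((x, y))
  let s1 := (PySem.List.pyRange 0 gw 1).foldl
    (fun s x => [(x, (0:Int)), (x, gh - 1)].foldl
      (fun s c => if pvOkB gw gh barriers c then PySem.Set.add s c else s) s)
    (PySem.Set.empty : PySem.Set (Int × Int))
  -- for y in range(gh): for x in (0, gw - 1): if ok(x, y): reach.add((x, y))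
  let seeds := (PySem.List.pyRange 0 gh 1).foldl
    (fun s y => [((0:Int), y), (gw - 1, y)].foldl
      (fun s c => if pvOkB gw gh barriers c then PySem.Set.add s c else s) s) s1
  let reach := pvSatB gw gh barriers seeds
  (PySem.List.pyRange 0 gw 1).map (fun x =>
    (PySem.List.pyRange 0 gh 1).map (fun y => decide ((x, y) ∈ reach)))

-- ===== PRECONDITION & SPEC =====
-- Pre_ excludes exactly the inputs on which A raises IndexError: the empty grid
-- (len(grid[0])), and grids whose rows are empty (gh = 0) unless every border probe
-- (x, 0), (x, -1) is a barrier, in which case the indexing is short-circuited away.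
def Pre_flood_fill_outside_with_barriers (grid : List (List Int)) (barriers : List (Int × Int)) : Prop :=
  grid ≠ [] ∧ (0 < grid.headI.length ∨
    ∀ x ∈ PySem.List.pyRange 0 (grid.length : Int) 1, (x, (0:Int)) ∈ barriers ∧ (x, (-1:Int)) ∈ barriers)
instance (grid : List (List Int)) (barriers : List (Int × Int)) : Decidable (Pre_flood_fill_outside_with_barriers grid barriers) := by unfold Pre_flood_fill_outside_with_barriers; infer_instance

def pvWitness_flood_fill_outside_with_barriers : List (List Int) × (List (Int × Int)) :=
  ([[0, 0], [0, 0]], [(1, 1)])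

def Spec_flood_fill_outside_with_barriers (grid : List (List Int)) (barriers : List (Int × Int)) (out : List (List Bool)) : Prop := out = flood_fill_outside_with_barriers_alt grid barriers
instance (grid : List (List Int)) (barriers : List (Int × Int)) (out : List (List Bool)) : Decidable (Spec_flood_fill_outside_with_barriers grid barriers out) := by unfold Spec_flood_fill_outside_with_barriers; infer_instance

-- ===== CLAIM (what is proved, stated in full; the proofs are below) =====
def Claim_equal_flood_fill_outside_with_barriers : Prop := ∀ (grid : List (List Int)) (barriers : List (Int × Int)), Dom_flood_fill_outside_with_barriers grid barriers → Pre_flood_fill_outside_with_barriers grid barriers → Spec_flood_fill_outside_with_barriers grid barriers (flood_fill_outside_with_barriers grid barriers)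

-- ===== LEMMAS AND PROOFS =====

-- the abstract reachability predicate both programs compute
abbrev pvNbr (c : Int × Int) : List (Int × Int) :=
  [(c.1 + 1, c.2), (c.1 - 1, c.2), (c.1, c.2 + 1), (c.1, c.2 - 1)]

abbrev pvAdj (c p : Int × Int) : Prop := p ∈ pvNbr c

abbrev pvSeedP (gw gh : Int) (barriers : List (Int × Int)) (p : Int × Int) : Prop :=
  pvOkB gw gh barriers p ∧ (p.1 = 0 ∨ p.1 = gw - 1 ∨ p.2 = 0 ∨ p.2 = gh - 1)

lemma pvMapDeltas (c : Int × Int) :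
    ([((1:Int), (0:Int)), (-1, 0), (0, 1), (0, -1)].map (fun d => (c.1 + d.1, c.2 + d.2))) =
      pvNbr c := by
  simp [pvNbr, sub_eq_add_neg]

inductive PvReach (gw gh : Int) (barriers : List (Int × Int)) : Int × Int → Prop
  | seed (p : Int × Int) : pvSeedP gw gh barriers p → PvReach gw gh barriers p
  | step (c p : Int × Int) : PvReach gw gh barriers c → pvAdj c p →
      pvOkB gw gh barriers p → PvReach gw gh barriers p

-- PvReach is the least seed-containing, step-closed set
lemma pvReach_le (gw gh : Int) (barriers : List (Int × Int)) (w : List (Int × Int))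
    (hs : ∀ p, pvSeedP gw gh barriers p → p ∈ w)
    (hc : ∀ c ∈ w, ∀ p, pvAdj c p → pvOkB gw gh barriers p → p ∈ w) :
    ∀ p, PvReach gw gh barriers p → p ∈ w := by
  intro p hp
  induction hp with
  | seed p h => exact hs p h
  | step c p _ hadj hok ih => exact hc c ih p hadj hok

-- A's seeding keeps (visited, outside, queue) identical and adds exactly the
-- non-barrier cells of the scanned list
lemma pvSeedA_fold (barriers : List (Int × Int)) :
    ∀ (cs : List (Int × Int)) (v : List (Int × Int)),
    ∃ w, cs.foldl (pvSeedA barriers) (v, v, v) = (w, w, w) ∧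
      (∀ p, p ∈ w ↔ p ∈ v ∨ (p ∈ cs ∧ p ∉ barriers)) := by
  intro cs
  induction cs with
  | nil => intro v; exact ⟨v, rfl, by simp⟩
  | cons c cs ih =>
    intro v
    rw [List.foldl_cons]
    by_cases hc : c ∉ barriers ∧ c ∉ v
    · have hstep : pvSeedA barriers (v, v, v) c = (v ++ [c], v ++ [c], v ++ [c]) := by
        simp only [pvSeedA, if_pos hc]
      rw [hstep]
      obtain ⟨w, heq, hmem⟩ := ih (v ++ [c])
      refine ⟨w, heq, fun p => ?_⟩
      rw [hmem p]
      simp only [List.mem_append, List.mem_cons, List.not_mem_nil, or_false]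
      constructor
      · rintro ((h | rfl) | ⟨h1, h2⟩)
        · exact Or.inl h
        · exact Or.inr ⟨Or.inl rfl, hc.1⟩
        · exact Or.inr ⟨Or.inr h1, h2⟩
      · rintro (h | ⟨(rfl | h1), h2⟩)
        · exact Or.inl (Or.inl h)
        · exact Or.inl (Or.inr rfl)
        · exact Or.inr ⟨h1, h2⟩
    · have hstep : pvSeedA barriers (v, v, v) c = (v, v, v) := by
        simp only [pvSeedA, if_neg hc]
      rw [hstep]
      obtain ⟨w, heq, hmem⟩ := ih v
      refine ⟨w, heq, fun p => ?_⟩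
      rw [hmem p]
      push Not at hc
      constructor
      · rintro (h | ⟨h1, h2⟩)
        · exact Or.inl h
        · exact Or.inr ⟨List.mem_cons_of_mem _ h1, h2⟩
      · rintro (h | ⟨h1, h2⟩)
        · exact Or.inl h
        · rcases List.mem_cons.mp h1 with rfl | h1
          · exact Or.inl (hc h2)
          · exact Or.inr ⟨h1, h2⟩

-- invariant proof for A's BFS loop
lemma pvBfsA_spec (gw gh : Int) (barriers : List (Int × Int)) :
    ∀ (v o q : List (Int × Int)), o = v → (∀ p ∈ q, p ∈ v) →
    (∀ p ∈ v, PvReach gw gh barriers p) →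
    (∀ p ∈ v, p ∉ q → ∀ n, pvAdj p n → pvOkB gw gh barriers n → n ∈ v) →
    (pvBfsA gw gh barriers v o q).2 = (pvBfsA gw gh barriers v o q).1 ∧
    (∀ p ∈ v, p ∈ (pvBfsA gw gh barriers v o q).1) ∧
    (∀ p ∈ (pvBfsA gw gh barriers v o q).1, PvReach gw gh barriers p) ∧
    (∀ c ∈ (pvBfsA gw gh barriers v o q).1, ∀ n, pvAdj c n → pvOkB gw gh barriers n →
      n ∈ (pvBfsA gw gh barriers v o q).1) := by
  intro v o q
  induction v, o, q using pvBfsA.induct gw gh barriers with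
  | case1 v o =>
    intro ho h1 h2 h3
    rw [pvBfsA]
    exact ⟨ho, fun p hp => hp, h2, fun c hc n hadj hok => h3 c hc (by simp) n hadj hok⟩
  | case2 v o c rest t ih =>
    intro ho h1 h2 h3
    subst ho
    obtain ⟨ext, heq, hnd, hmem, hcl⟩ :=
      pvStepA_fold_spec gw gh barriers c [((1:Int), (0:Int)), (-1, 0), (0, 1), (0, -1)] o o []
    have heqt : t = (o ++ ext, o ++ ext, [] ++ ext) := heq
    rw [heqt] at ih
    simp only [List.nil_append] at ih
    have hBfsEq : pvBfsA gw gh barriers o o (c :: rest) =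
        pvBfsA gw gh barriers (o ++ ext) (o ++ ext) (rest ++ ext) := by
      rw [pvBfsA]
      simp only [heq, List.nil_append]
    have hcv : c ∈ o := h1 c (List.mem_cons_self ..)
    have h1' : ∀ p ∈ rest ++ ext, p ∈ o ++ ext := by
      intro p hp
      rcases List.mem_append.mp hp with hp | hp
      · exact List.mem_append_left _ (h1 p (List.mem_cons_of_mem _ hp))
      · exact List.mem_append_right _ hp
    have h2' : ∀ p ∈ o ++ ext, PvReach gw gh barriers p := by
      intro p hp
      rcases List.mem_append.mp hp with hp | hp
      · exact h2 p hp
      · obtain ⟨hmap, hin, hbar, -⟩ := hmem p hp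
        refine PvReach.step c p (h2 c hcv) ?_ ⟨hin.1, hin.2.1, hin.2.2.1, hin.2.2.2, hbar⟩
        rw [pvAdj, ← pvMapDeltas c]
        exact hmap
    have h3' : ∀ p ∈ o ++ ext, p ∉ rest ++ ext →
        ∀ n, pvAdj p n → pvOkB gw gh barriers n → n ∈ o ++ ext := by
      intro p hp hnp n hadj hok
      rcases List.mem_append.mp hp with hpv | hpe
      · by_cases hpc : p = c
        · subst hpc
          rw [pvAdj, ← pvMapDeltas p] at hadj
          obtain ⟨d, hd, rfl⟩ := List.mem_map.mp hadj
          exact hcl d hd ⟨hok.1, hok.2.1, hok.2.2.1, hok.2.2.2.1⟩ hok.2.2.2.2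
        · have hnc : p ∉ c :: rest := by
            intro hmem2
            rcases List.mem_cons.mp hmem2 with rfl | hmem2
            · exact hpc rfl
            · exact hnp (List.mem_append_left _ hmem2)
          exact List.mem_append_left _ (h3 p hpv hnc n hadj hok)
      · exact absurd (List.mem_append_right rest hpe) hnp
    obtain ⟨i1, i2, i3, i4⟩ := ih trivial h1' h2' h3'
    rw [hBfsEq]
    exact ⟨i1, fun p hp => i2 p (List.mem_append_left _ hp), i3, i4⟩

-- characterisation of A's seed set (under the precondition)
lemma pvSeedsA_char (gw gh : Int) (barriers : List (Int × Int)) (hgw : 0 < gw) (hgh : 0 ≤ gh)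
    (hpre : 0 < gh ∨ ∀ x ∈ PySem.List.pyRange 0 gw 1, (x, (0:Int)) ∈ barriers ∧ (x, (-1:Int)) ∈ barriers) :
    ∃ w, ((PySem.List.pyRange 0 gh 1).foldl
        (fun s y => [((0:Int), y), (gw - 1, y)].foldl (pvSeedA barriers) s)
        ((PySem.List.pyRange 0 gw 1).foldl
          (fun s x => [(x, (0:Int)), (x, gh - 1)].foldl (pvSeedA barriers) s)
          ([], [], []))) = (w, w, w) ∧
      (∀ p, p ∈ w ↔ pvSeedP gw gh barriers p) := by
  have hflat1 := pvFoldl_foldl_flatMap (f := pvSeedA barriers)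
    (g := fun x => [(x, (0:Int)), (x, gh - 1)]) (PySem.List.pyRange 0 gw 1)
    (([], [], []) : List (Int × Int) × List (Int × Int) × List (Int × Int))
  beta_reduce at hflat1
  rw [hflat1]
  have hflat2 := pvFoldl_foldl_flatMap (f := pvSeedA barriers)
    (g := fun y => [((0:Int), y), (gw - 1, y)]) (PySem.List.pyRange 0 gh 1)
    (((PySem.List.pyRange 0 gw 1).flatMap
        (fun x => [(x, (0:Int)), (x, gh - 1)])).foldl (pvSeedA barriers) ([], [], []))
  beta_reduce at hflat2
  rw [hflat2, ← List.foldl_append]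
  obtain ⟨w, heq, hmem⟩ := pvSeedA_fold barriers
    ((PySem.List.pyRange 0 gw 1).flatMap (fun x => [(x, (0:Int)), (x, gh - 1)]) ++
      (PySem.List.pyRange 0 gh 1).flatMap (fun y => [((0:Int), y), (gw - 1, y)])) []
  refine ⟨w, heq, fun p => ?_⟩
  rw [hmem p]
  obtain ⟨a, b⟩ := p
  simp only [List.not_mem_nil, false_or, List.mem_append, List.mem_flatMap,
    PySem.List.mem_pyRange_one, List.mem_cons, or_false, Prod.mk.injEq, pvSeedP, pvOkB]
  by_cases hgh0 : 0 < gh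
  · constructor
    · rintro ⟨⟨x, hx, (⟨rfl, rfl⟩ | ⟨rfl, rfl⟩)⟩ | ⟨y, hy, (⟨rfl, rfl⟩ | ⟨rfl, rfl⟩)⟩, hnb⟩
      · exact ⟨⟨hx.1, hx.2, by omega, by omega, hnb⟩, by omega⟩
      · exact ⟨⟨hx.1, hx.2, by omega, by omega, hnb⟩, by omega⟩
      · exact ⟨⟨by omega, by omega, hy.1, hy.2, hnb⟩, by omega⟩
      · exact ⟨⟨by omega, by omega, hy.1, hy.2, hnb⟩, by omega⟩
    · rintro ⟨⟨h1, h2, h3, h4, hnb⟩, hborder⟩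
      refine ⟨?_, hnb⟩
      rcases hborder with rfl | rfl | rfl | rfl
      · exact Or.inr ⟨b, ⟨h3, h4⟩, Or.inl ⟨rfl, rfl⟩⟩
      · exact Or.inr ⟨b, ⟨h3, h4⟩, Or.inr ⟨rfl, rfl⟩⟩
      · exact Or.inl ⟨a, ⟨h1, h2⟩, Or.inl ⟨rfl, rfl⟩⟩
      · exact Or.inl ⟨a, ⟨h1, h2⟩, Or.inr ⟨rfl, rfl⟩⟩
  · have hg0 : gh = 0 := by omega
    rcases hpre with h | hall
    · omega
    constructor
    · rintro ⟨⟨x, hx, (⟨ha, hb⟩ | ⟨ha, hb⟩)⟩ | ⟨y, hy, -⟩, hnb⟩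
      · refine absurd ?_ hnb
        rw [show (a, b) = (x, (0:Int)) from by rw [ha, hb]]
        exact (hall x (PySem.List.mem_pyRange_one.mpr hx)).1
      · refine absurd ?_ hnb
        rw [show (a, b) = (x, (-1:Int)) from by rw [ha, hb]; congr 1; omega]
        exact (hall x (PySem.List.mem_pyRange_one.mpr hx)).2
      · exact absurd hy (by omega)
    · rintro ⟨⟨h1, h2, h3, h4, -⟩, -⟩
      omega

-- membership in B's `new`
lemma pvNewB_mem (gw gh : Int) (barriers : List (Int × Int)) (reach : PySem.Set (Int × Int)) :
    ∀ p, p ∈ pvNewB gw gh barriers reach ↔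
      (∃ c ∈ reach, pvAdj c p) ∧ pvOkB gw gh barriers p ∧ p ∉ reach := by
  intro p
  rw [pvNewB_eq]
  rw [PySem.Set.mem_ofList, List.mem_filter, decide_eq_true_eq, List.mem_flatMap]

-- invariant proof for B's saturation loop
lemma pvSatB_spec (gw gh : Int) (barriers : List (Int × Int)) :
    ∀ (reach : PySem.Set (Int × Int)), (∀ p ∈ reach, PvReach gw gh barriers p) →
    (∀ p ∈ reach, p ∈ pvSatB gw gh barriers reach) ∧
    (∀ p ∈ pvSatB gw gh barriers reach, PvReach gw gh barriers p) ∧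
    (∀ c ∈ pvSatB gw gh barriers reach, ∀ n, pvAdj c n → pvOkB gw gh barriers n →
      n ∈ pvSatB gw gh barriers reach) := by
  intro reach
  induction reach using pvSatB.induct gw gh barriers with
  | case1 r hnew =>
    intro h2
    rw [pvSatB, if_pos hnew]
    refine ⟨fun p hp => hp, h2, fun c hc n hadj hok => ?_⟩
    by_cases hn : n ∈ r
    · exact hn
    · exfalso
      have hmem : n ∈ pvNewB gw gh barriers r :=
        (pvNewB_mem gw gh barriers r n).mpr ⟨⟨c, hc, hadj⟩, hok, hn⟩
      rw [hnew] at hmem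
      simp at hmem
  | case2 r hnew ih =>
    intro h2
    rw [pvSatB, if_neg hnew]
    have h2' : ∀ p ∈ PySem.Set.union r (pvNewB gw gh barriers r), PvReach gw gh barriers p := by
      intro p hp
      rw [PySem.Set.mem_union] at hp
      rcases hp with hp | hp
      · exact h2 p hp
      · obtain ⟨⟨c, hc, hadj⟩, hok, -⟩ := (pvNewB_mem gw gh barriers r p).mp hp
        exact PvReach.step c p (h2 c hc) hadj hok
    obtain ⟨m1, m2, m3⟩ := ih h2'
    exact ⟨fun p hp => m1 p (by rw [PySem.Set.mem_union]; exact Or.inl hp), m2, m3⟩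

-- characterisation of B's seed set (unconditional: B checks bounds itself)
lemma pvSeedsB_char (gw gh : Int) (barriers : List (Int × Int)) :
    ∀ p, p ∈ ((PySem.List.pyRange 0 gh 1).foldl
      (fun s y => [((0:Int), y), (gw - 1, y)].foldl
        (fun s c => if pvOkB gw gh barriers c then PySem.Set.add s c else s) s)
      ((PySem.List.pyRange 0 gw 1).foldl
        (fun s x => [(x, (0:Int)), (x, gh - 1)].foldl
          (fun s c => if pvOkB gw gh barriers c then PySem.Set.add s c else s) s)
        (PySem.Set.empty : PySem.Set (Int × Int)))) ↔ pvSeedP gw gh barriers p := by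
  intro p
  have hflat1 := pvFoldl_foldl_flatMap
    (f := fun s c => if pvOkB gw gh barriers c then PySem.Set.add s c else s)
    (g := fun x => [(x, (0:Int)), (x, gh - 1)]) (PySem.List.pyRange 0 gw 1)
    (PySem.Set.empty : PySem.Set (Int × Int))
  beta_reduce at hflat1
  rw [hflat1]
  have hflat2 := pvFoldl_foldl_flatMap
    (f := fun s c => if pvOkB gw gh barriers c then PySem.Set.add s c else s)
    (g := fun y => [((0:Int), y), (gw - 1, y)]) (PySem.List.pyRange 0 gh 1)
    (((PySem.List.pyRange 0 gw 1).flatMap (fun x => [(x, (0:Int)), (x, gh - 1)])).foldl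
      (fun s c => if pvOkB gw gh barriers c then PySem.Set.add s c else s)
      (PySem.Set.empty : PySem.Set (Int × Int)))
  beta_reduce at hflat2
  rw [hflat2, ← List.foldl_append]
  rw [PySem.List.foldl_ite_eq_foldl_filter (p := fun c => pvOkB gw gh barriers c)
    (f := PySem.Set.add)]
  have hof : List.foldl PySem.Set.add (PySem.Set.empty : PySem.Set (Int × Int))
      ((((PySem.List.pyRange 0 gw 1).flatMap (fun x => [(x, (0:Int)), (x, gh - 1)])) ++
        ((PySem.List.pyRange 0 gh 1).flatMap (fun y => [((0:Int), y), (gw - 1, y)]))).filter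
        (fun c => decide (pvOkB gw gh barriers c))) =
      PySem.Set.ofList ((((PySem.List.pyRange 0 gw 1).flatMap (fun x => [(x, (0:Int)), (x, gh - 1)])) ++
        ((PySem.List.pyRange 0 gh 1).flatMap (fun y => [((0:Int), y), (gw - 1, y)]))).filter
        (fun c => decide (pvOkB gw gh barriers c))) :=
    (PySem.Set.ofList_eq_foldl _).symm
  rw [hof, PySem.Set.mem_ofList, List.mem_filter, decide_eq_true_eq]
  obtain ⟨a, b⟩ := p
  simp only [List.mem_append, List.mem_flatMap, PySem.List.mem_pyRange_one, List.mem_cons,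
    List.not_mem_nil, or_false, Prod.mk.injEq, pvSeedP, pvOkB]
  constructor
  · rintro ⟨hmem, h1, h2, h3, h4, hnb⟩
    refine ⟨⟨h1, h2, h3, h4, hnb⟩, ?_⟩
    rcases hmem with ⟨x, hx, (⟨rfl, rfl⟩ | ⟨rfl, rfl⟩)⟩ | ⟨y, hy, (⟨rfl, rfl⟩ | ⟨rfl, rfl⟩)⟩ <;> omega
  · rintro ⟨⟨h1, h2, h3, h4, hnb⟩, hborder⟩
    refine ⟨?_, h1, h2, h3, h4, hnb⟩
    rcases hborder with rfl | rfl | rfl | rfl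
    · exact Or.inr ⟨b, ⟨h3, h4⟩, Or.inl ⟨rfl, rfl⟩⟩
    · exact Or.inr ⟨b, ⟨h3, h4⟩, Or.inr ⟨rfl, rfl⟩⟩
    · exact Or.inl ⟨a, ⟨h1, h2⟩, Or.inl ⟨rfl, rfl⟩⟩
    · exact Or.inl ⟨a, ⟨h1, h2⟩, Or.inr ⟨rfl, rfl⟩⟩

-- ===== VERDICT (by name: the statement is the Claim_ definition above) =====
theorem flood_fill_outside_with_barriers_spec : Claim_equal_flood_fill_outside_with_barriers := by
  intro grid barriers _ hpre
  obtain ⟨hne, hpre2⟩ := hpre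
  unfold Spec_flood_fill_outside_with_barriers
  have hgw : (0:Int) < (grid.length : Int) := by
    have hlen : grid.length ≠ 0 := fun h => hne (List.length_eq_zero_iff.mp h)
    omega
  have hgh : (0:Int) ≤ (grid.headI.length : Int) := by positivity
  have hpre2' : (0:Int) < (grid.headI.length : Int) ∨
      ∀ x ∈ PySem.List.pyRange 0 (grid.length : Int) 1,
        (x, (0:Int)) ∈ barriers ∧ (x, (-1:Int)) ∈ barriers := by
    rcases hpre2 with h | h
    · left; exact_mod_cast h
    · right; exact h
  obtain ⟨w, hw, hwmem⟩ :=
    pvSeedsA_char (grid.length : Int) (grid.headI.length : Int) barriers hgw hgh hpre2'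
  simp only [flood_fill_outside_with_barriers, flood_fill_outside_with_barriers_alt]
  rw [hw]
  apply List.map_congr_left
  intro x hx
  apply List.map_congr_left
  intro y hy
  rw [decide_eq_decide]
  obtain ⟨a1, a2, a3, a4⟩ :=
    pvBfsA_spec (grid.length : Int) (grid.headI.length : Int) barriers w w w rfl
      (fun p hp => hp)
      (fun p hp => PvReach.seed p ((hwmem p).mp hp))
      (fun p hp hnp => absurd hp hnp)
  have hBmem := pvSeedsB_char (grid.length : Int) (grid.headI.length : Int) barriers
  obtain ⟨b1, b2, b3⟩ :=
    pvSatB_spec (grid.length : Int) (grid.headI.length : Int) barriers _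
      (fun p hp => PvReach.seed p ((hBmem p).mp hp))
  constructor
  · intro h
    rw [a1] at h
    exact pvReach_le (grid.length : Int) (grid.headI.length : Int) barriers _
      (fun p hps => b1 p ((hBmem p).mpr hps)) b3 (x, y) (a3 _ h)
  · intro h
    rw [a1]
    exact pvReach_le (grid.length : Int) (grid.headI.length : Int) barriers _
      (fun p hps => a2 p ((hwmem p).mpr hps)) a4 (x, y) (b2 _ h)
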